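-- pv_equiv track=rewrite | github.com/marc-chenhao/TextAnalysis | CyberbullyMining/src/TextClassification.py | compare_result
-- ===== SOURCE A (Python) =====
-- def compare_result(label,svm_pre,nb_pre):
--     both_correct = 0
--     svm_correct = 0
--     nb_correct = 0
--     both_incorrect = 0
--     for i in range(len(label)):
--         if label[i] == svm_pre[i] and label[i] == nb_pre[i]:
--             both_correct += 1
--         elif label[i] != svm_pre[i] and label[i] != nb_pre[i]:
--             both_incorrect += 1
--         elif label[i] == svm_pre[i] and label[i] != nb_pre[i]:
--             svm_correct += 1
--         elif label[i] != svm_pre[i] and label[i] == nb_pre[i]: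
--             nb_correct += 1
--     return (both_correct,svm_correct,nb_correct,both_incorrect)
-- ===== SOURCE B (Python) =====
-- def compare_result(label, svm_pre, nb_pre):
--     n = len(label)
--     s = sum(label[i] == svm_pre[i] for i in range(n))
--     t = sum(label[i] == nb_pre[i] for i in range(n))
--     b = sum(label[i] == svm_pre[i] and label[i] == nb_pre[i] for i in range(n))
--     return (b, s - b, t - b, n - s - t + b)
-- ===== Notes on version B (the rewrite author's own statement) =====
-- stated objective: alternative
-- what changed: Instead of classifying each index into one of four categories with an if/elif chain, B makes three staged passes counting svm matches, nb matches and joint matches, and recovers the four category counts by inclusion-exclusion arithmetic (b, s-b, t-b, n-s-t+b).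
import Mathlib
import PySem

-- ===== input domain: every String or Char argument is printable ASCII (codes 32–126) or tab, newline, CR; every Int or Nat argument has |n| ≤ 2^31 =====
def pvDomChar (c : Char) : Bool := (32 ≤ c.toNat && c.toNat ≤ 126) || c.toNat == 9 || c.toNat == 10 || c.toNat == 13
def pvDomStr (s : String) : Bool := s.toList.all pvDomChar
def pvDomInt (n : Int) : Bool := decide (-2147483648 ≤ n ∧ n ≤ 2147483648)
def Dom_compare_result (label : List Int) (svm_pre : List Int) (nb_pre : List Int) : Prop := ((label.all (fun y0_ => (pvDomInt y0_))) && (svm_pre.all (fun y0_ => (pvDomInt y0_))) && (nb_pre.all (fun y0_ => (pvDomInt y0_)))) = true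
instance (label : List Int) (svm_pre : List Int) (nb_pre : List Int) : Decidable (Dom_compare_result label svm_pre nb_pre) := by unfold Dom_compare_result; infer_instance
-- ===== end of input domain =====

-- B replaces A's four-way if/elif classification by three staged match-counting passes
-- plus inclusion-exclusion arithmetic (objective: alternative).


-- ===== PORT A =====
-- literal port of A: four accumulators, four-way if/elif chain over i in range(len(label));
-- indexing is total via pyGetD, exact under Pre_ (all indices in range)
def pvAStep (label : List Int) (svm_pre : List Int) (nb_pre : List Int)
    (acc : Int × Int × Int × Int) (i : Int) : Int × Int × Int × Int :=
  let (bc, sc, nc, bi) := acc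
  let l := PySem.List.pyGetD label i 0
  let s := PySem.List.pyGetD svm_pre i 0
  let n := PySem.List.pyGetD nb_pre i 0
  if l = s ∧ l = n then (bc + 1, sc, nc, bi)
  else if l ≠ s ∧ l ≠ n then (bc, sc, nc, bi + 1)
  else if l = s ∧ l ≠ n then (bc, sc + 1, nc, bi)
  else if l ≠ s ∧ l = n then (bc, sc, nc + 1, bi)
  else acc

def compare_result (label : List Int) (svm_pre : List Int) (nb_pre : List Int) : Int × Int × Int × Int :=
  (PySem.List.pyRange 0 (PySem.List.len label) 1).foldl
    (pvAStep label svm_pre nb_pre) (0, 0, 0, 0)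

-- ===== PORT B =====
-- literal port of B: three staged 0/1-summing passes, then inclusion-exclusion arithmetic
def compare_result_alt (label : List Int) (svm_pre : List Int) (nb_pre : List Int) : Int × Int × Int × Int :=
  let n := PySem.List.len label
  let r := PySem.List.pyRange 0 n 1
  let s := r.foldl (fun a i => a + (if PySem.List.pyGetD label i 0 = PySem.List.pyGetD svm_pre i 0 then 1 else 0)) (0 : Int)
  let t := r.foldl (fun a i => a + (if PySem.List.pyGetD label i 0 = PySem.List.pyGetD nb_pre i 0 then 1 else 0)) (0 : Int)
  let b := r.foldl (fun a i => a + (if PySem.List.pyGetD label i 0 = PySem.List.pyGetD svm_pre i 0 ∧ PySem.List.pyGetD label i 0 = PySem.List.pyGetD nb_pre i 0 then 1 else 0)) (0 : Int)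
  (b, s - b, t - b, n - s - t + b)

-- ===== PRECONDITION & SPEC =====
-- Pre_ excludes exactly the ragged inputs (label longer than svm_pre or nb_pre) on which
-- the Python A (and B) raises IndexError.
def Pre_compare_result (label : List Int) (svm_pre : List Int) (nb_pre : List Int) : Prop :=
  label.length ≤ svm_pre.length ∧ label.length ≤ nb_pre.length
instance (label : List Int) (svm_pre : List Int) (nb_pre : List Int) : Decidable (Pre_compare_result label svm_pre nb_pre) := by unfold Pre_compare_result; infer_instance

def pvWitness_compare_result : List Int × List Int × List Int := ([1, 0, 1], [1, 1, 0], [0, 0, 1])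

def Spec_compare_result (label : List Int) (svm_pre : List Int) (nb_pre : List Int) (out : Int × Int × Int × Int) : Prop := out = compare_result_alt label svm_pre nb_pre
instance (label : List Int) (svm_pre : List Int) (nb_pre : List Int) (out : Int × Int × Int × Int) : Decidable (Spec_compare_result label svm_pre nb_pre out) := by unfold Spec_compare_result; infer_instance

-- ===== CLAIM (what is proved, stated in full; the proofs are below) =====
def Claim_equal_compare_result : Prop := ∀ (label : List Int) (svm_pre : List Int) (nb_pre : List Int), Dom_compare_result label svm_pre nb_pre → Pre_compare_result label svm_pre nb_pre → Spec_compare_result label svm_pre nb_pre (compare_result label svm_pre nb_pre)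

-- ===== LEMMAS AND PROOFS =====

-- abbreviations for the two per-index match tests (proof-side only)
def pvE1 (label svm_pre : List Int) (i : Int) : Bool :=
  PySem.List.pyGetD label i 0 == PySem.List.pyGetD svm_pre i 0

-- A's fold = the four countP's of the two match tests over the index list
theorem pvA_foldl (label svm_pre nb_pre : List Int) (is : List Int)
    (bc sc nc bi : Int) :
    is.foldl (pvAStep label svm_pre nb_pre) (bc, sc, nc, bi)
    = (bc + (is.countP (fun i => pvE1 label svm_pre i && pvE1 label nb_pre i) : Int),
       sc + (is.countP (fun i => pvE1 label svm_pre i && !pvE1 label nb_pre i) : Int),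
       nc + (is.countP (fun i => !pvE1 label svm_pre i && pvE1 label nb_pre i) : Int),
       bi + (is.countP (fun i => !pvE1 label svm_pre i && !pvE1 label nb_pre i) : Int)) := by
  induction is generalizing bc sc nc bi with
  | nil => simp
  | cons i is ih =>
    by_cases hs : PySem.List.pyGetD label i 0 = PySem.List.pyGetD svm_pre i 0 <;>
      by_cases hn : PySem.List.pyGetD label i 0 = PySem.List.pyGetD nb_pre i 0
    · have h1 : pvAStep label svm_pre nb_pre (bc, sc, nc, bi) i = (bc + 1, sc, nc, bi) := by
        simp only [pvAStep]; split_ifs <;> first | rfl | omega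
      rw [List.foldl_cons, h1, ih]
      simp [List.countP_cons, pvE1, hs, hn, Prod.ext_iff]
      all_goals omega
    · have h1 : pvAStep label svm_pre nb_pre (bc, sc, nc, bi) i = (bc, sc + 1, nc, bi) := by
        simp only [pvAStep]; split_ifs <;> first | rfl | omega
      rw [List.foldl_cons, h1, ih]
      simp [List.countP_cons, pvE1, hs, hn, Prod.ext_iff]
      all_goals omega
    · have h1 : pvAStep label svm_pre nb_pre (bc, sc, nc, bi) i = (bc, sc, nc + 1, bi) := by
        simp only [pvAStep]; split_ifs <;> first | rfl | omega
      rw [List.foldl_cons, h1, ih]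
      simp [List.countP_cons, pvE1, hs, hn, Prod.ext_iff]
      all_goals omega
    · have h1 : pvAStep label svm_pre nb_pre (bc, sc, nc, bi) i = (bc, sc, nc, bi + 1) := by
        simp only [pvAStep]; split_ifs <;> first | rfl | omega
      rw [List.foldl_cons, h1, ih]
      simp [List.countP_cons, pvE1, hs, hn, Prod.ext_iff]
      all_goals omega

-- each B pass is a countP
theorem pvB_sum (is : List Int) (p : Int → Prop) [DecidablePred p] (c : Int) :
    is.foldl (fun a i => a + (if p i then 1 else 0)) c
    = c + (is.countP (fun i => decide (p i)) : Int) := by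
  induction is generalizing c with
  | nil => simp
  | cons i is ih =>
    rw [List.foldl_cons, ih, List.countP_cons]
    by_cases h : p i <;> simp [h] <;> push_cast <;> ring

-- the four disjoint countP's refine the staged counts (inclusion-exclusion, Nat level)
theorem pvIE (is : List Int) (e1 e2 : Int → Bool) :
    is.countP (fun i => e1 i && e2 i) + is.countP (fun i => e1 i && !e2 i) = is.countP e1
  ∧ is.countP (fun i => e1 i && e2 i) + is.countP (fun i => !e1 i && e2 i) = is.countP e2
  ∧ is.countP (fun i => e1 i && e2 i) + is.countP (fun i => e1 i && !e2 i)
      + is.countP (fun i => !e1 i && e2 i) + is.countP (fun i => !e1 i && !e2 i) = is.length := by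
  induction is with
  | nil => simp
  | cons i is ih =>
    obtain ⟨h1, h2, h3⟩ := ih
    cases hx : e1 i <;> cases hy : e2 i <;>
      simp [List.countP_cons, hx, hy] <;> omega

-- ===== VERDICT (by name: the statement is the Claim_ definition above) =====
theorem compare_result_spec : Claim_equal_compare_result := by
  intro label svm_pre nb_pre _ _
  unfold Spec_compare_result compare_result
  rw [pvA_foldl]
  simp only [compare_result_alt]
  rw [pvB_sum _ (fun i => PySem.List.pyGetD label i 0 = PySem.List.pyGetD svm_pre i 0),
      pvB_sum _ (fun i => PySem.List.pyGetD label i 0 = PySem.List.pyGetD nb_pre i 0),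
      pvB_sum _ (fun i => PySem.List.pyGetD label i 0 = PySem.List.pyGetD svm_pre i 0 ∧ PySem.List.pyGetD label i 0 = PySem.List.pyGetD nb_pre i 0)]
  obtain ⟨h1, h2, h3⟩ := pvIE (PySem.List.pyRange 0 (PySem.List.len label) 1)
    (pvE1 label svm_pre) (pvE1 label nb_pre)
  have pvDec : ∀ a b : Int, decide (a = b) = (a == b) := by
    intro a b; by_cases h : a = b <;> simp [h]
  have hc1 : (fun i => decide (PySem.List.pyGetD label i 0 = PySem.List.pyGetD svm_pre i 0)) = pvE1 label svm_pre := by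
    funext i; simp [pvE1, pvDec]
  have hc2 : (fun i => decide (PySem.List.pyGetD label i 0 = PySem.List.pyGetD nb_pre i 0)) = pvE1 label nb_pre := by
    funext i; simp [pvE1, pvDec]
  have hc3 : (fun i => decide (PySem.List.pyGetD label i 0 = PySem.List.pyGetD svm_pre i 0 ∧ PySem.List.pyGetD label i 0 = PySem.List.pyGetD nb_pre i 0))
      = fun i => pvE1 label svm_pre i && pvE1 label nb_pre i := by
    funext i; simp [Bool.decide_and, pvE1, pvDec]
  simp only [hc1, hc2, hc3]
  have hn : PySem.List.len label = ((PySem.List.pyRange 0 (PySem.List.len label) 1).length : Int) := by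
    simp [PySem.List.len, PySem.List.length_pyRange_one]
  simp only [Prod.mk.injEq]
  refine ⟨?_, ?_, ?_, ?_⟩ <;> first | trivial | omega
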